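-- pv_equiv track=rewrite | github.com/Ascendral/KlomboAGI | klomboagi/reasoning/arc_feature_learner.py | extract_val_n4_n8
-- ===== SOURCE A (Python) =====
-- Grid = list[list[int]]
--
-- def extract_val_n4_n8(grid: Grid, r: int, c: int, bg: int) -> tuple:
--     """Value + cardinal count + 8-neighbor count."""
--     rows, cols = len(grid), len(grid[0])
--     val = grid[r][c]
--     n4 = sum(1 for dr,dc in [(-1,0),(1,0),(0,-1),(0,1)]
--              if 0<=r+dr<rows and 0<=c+dc<cols and grid[r+dr][c+dc]!=bg)
--     n8 = sum(1 for dr in [-1,0,1] for dc in [-1,0,1]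
--              if (dr or dc) and 0<=r+dr<rows and 0<=c+dc<cols and grid[r+dr][c+dc]!=bg)
--     return (val, n4, n8)
-- ===== SOURCE B (Python) =====
-- def extract_val_n4_n8(grid, r, c, bg):
--     """Value + cardinal and 8-neighbor non-bg counts, via a clamped 3x3 box and a
--     clamped cross counted by inclusion-exclusion (subtracting the center)."""
--     rows, cols = len(grid), len(grid[0])
--     rlo, rhi = max(0, r - 1), min(rows, r + 2)
--     clo, chi = max(0, c - 1), min(cols, c + 2)
--     box = sum(1 for i in range(rlo, rhi) for j in range(clo, chi) if grid[i][j] != bg)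
--     cross = 0
--     if 0 <= r < rows:
--         cross += sum(1 for j in range(clo, chi) if grid[r][j] != bg)
--     if 0 <= c < cols:
--         cross += sum(1 for i in range(rlo, rhi) if grid[i][c] != bg)
--     if 0 <= r < rows and 0 <= c < cols and grid[r][c] != bg:
--         box -= 1
--         cross -= 2
--     return (grid[r][c], cross, box)
-- ===== Notes on version B (the rewrite author's own statement) =====
-- stated objective: alternative
-- what changed: Instead of enumerating neighbor offsets with per-offset bounds tests, B clamps the 3x3 box and the cardinal cross to the grid, counts non-bg cells over those clamped index ranges, and obtains both counts by inclusion-exclusion (subtracting the center once from the box and twice from the cross).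
import Mathlib
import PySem

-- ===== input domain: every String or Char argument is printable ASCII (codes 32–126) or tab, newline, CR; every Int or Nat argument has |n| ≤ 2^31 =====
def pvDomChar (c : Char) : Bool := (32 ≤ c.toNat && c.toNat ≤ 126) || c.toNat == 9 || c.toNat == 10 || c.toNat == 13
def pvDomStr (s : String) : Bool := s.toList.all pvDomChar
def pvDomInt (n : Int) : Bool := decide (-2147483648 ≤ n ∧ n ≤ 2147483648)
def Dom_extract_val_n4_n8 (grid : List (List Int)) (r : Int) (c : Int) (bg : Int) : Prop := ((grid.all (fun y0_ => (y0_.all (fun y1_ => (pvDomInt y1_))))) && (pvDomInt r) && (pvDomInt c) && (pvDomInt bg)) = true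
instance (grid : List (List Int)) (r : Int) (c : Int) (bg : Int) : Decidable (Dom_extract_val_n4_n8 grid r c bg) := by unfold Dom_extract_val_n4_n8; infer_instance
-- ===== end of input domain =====

-- B replaces A's two offset-enumeration passes by counting non-bg cells of the clamped
-- 3x3 box and the clamped cross, subtracting the center by inclusion-exclusion (same cost; alternative decomposition).


-- ===== PORT A =====
-- grid[i][j] with Python index semantics (negative wraps; exact wherever Python
-- does not raise — Pre_ excludes the raising inputs, so the getD defaults are never hit).
def pvCellA (grid : List (List Int)) (i j : Int) : Int :=
  (PySem.List.pyGet? ((PySem.List.pyGet? grid i).getD []) j).getD 0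

def extract_val_n4_n8 (grid : List (List Int)) (r : Int) (c : Int) (bg : Int) : Int × Int × Int :=
  let rows : Int := grid.length
  let cols : Int := ((PySem.List.pyGet? grid 0).getD []).length
  let val : Int := pvCellA grid r c
  let n4 : Int :=
    [((-1 : Int), (0 : Int)), (1, 0), (0, -1), (0, 1)].foldl (fun acc p =>
      acc + if 0 ≤ r + p.1 ∧ r + p.1 < rows ∧ 0 ≤ c + p.2 ∧ c + p.2 < cols ∧
          pvCellA grid (r + p.1) (c + p.2) ≠ bg then 1 else 0) 0
  let n8 : Int :=
    [(-1 : Int), 0, 1].foldl (fun acc dr =>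
      [(-1 : Int), 0, 1].foldl (fun acc dc =>
        acc + if (dr ≠ 0 ∨ dc ≠ 0) ∧ 0 ≤ r + dr ∧ r + dr < rows ∧ 0 ≤ c + dc ∧ c + dc < cols ∧
            pvCellA grid (r + dr) (c + dc) ≠ bg then 1 else 0) acc) 0
  (val, n4, n8)

-- ===== PORT B =====
def pvCellB (grid : List (List Int)) (i j : Int) : Int :=
  (PySem.List.pyGet? ((PySem.List.pyGet? grid i).getD []) j).getD 0

def extract_val_n4_n8_alt (grid : List (List Int)) (r : Int) (c : Int) (bg : Int) : Int × Int × Int :=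
  let rows : Int := grid.length
  let cols : Int := ((PySem.List.pyGet? grid 0).getD []).length
  let rlo : Int := max 0 (r - 1)
  let rhi : Int := min rows (r + 2)
  let clo : Int := max 0 (c - 1)
  let chi : Int := min cols (c + 2)
  let box : Int :=
    (PySem.List.pyRange rlo rhi 1).foldl (fun a i =>
      (PySem.List.pyRange clo chi 1).foldl (fun a j =>
        a + if pvCellB grid i j ≠ bg then 1 else 0) a) 0
  let cross : Int :=
    (if 0 ≤ r ∧ r < rows then
      (PySem.List.pyRange clo chi 1).foldl (fun a j =>
        a + if pvCellB grid r j ≠ bg then 1 else 0) 0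
     else 0) +
    (if 0 ≤ c ∧ c < cols then
      (PySem.List.pyRange rlo rhi 1).foldl (fun a i =>
        a + if pvCellB grid i c ≠ bg then 1 else 0) 0
     else 0)
  let p : Int × Int :=
    if 0 ≤ r ∧ r < rows ∧ 0 ≤ c ∧ c < cols ∧ pvCellB grid r c ≠ bg
    then (box - 1, cross - 2) else (box, cross)
  (pvCellB grid r c, p.2, p.1)

-- ===== PRECONDITION & SPEC =====
-- length of the row Python's grid[i] selects (negative i wraps); [] if i out of range
def pvRowLen (grid : List (List Int)) (i : Int) : Int :=
  (((PySem.List.pyGet? grid i).getD []).length : Int)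

-- Pre_ is exactly the set of inputs on which A returns (no IndexError): grid non-empty,
-- r and c valid Python indices (negative in-range included), and every neighbor access
-- that passes A's bounds test (checked against len(grid[0])) lands inside its actual row
-- (only relevant for ragged grids).
def Pre_extract_val_n4_n8 (grid : List (List Int)) (r : Int) (c : Int) (bg : Int) : Prop :=
  grid ≠ [] ∧
  -(grid.length : Int) ≤ r ∧ r < grid.length ∧
  -(pvRowLen grid r) ≤ c ∧ c < pvRowLen grid r ∧
  ∀ p ∈ ([(-1, -1), (-1, 0), (-1, 1), (0, -1), (0, 1), (1, -1), (1, 0), (1, 1)] : List (Int × Int)),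
    (0 ≤ r + p.1 ∧ r + p.1 < grid.length ∧ 0 ≤ c + p.2 ∧ c + p.2 < ((grid.headI).length : Int)) →
      c + p.2 < pvRowLen grid (r + p.1)

instance (grid : List (List Int)) (r : Int) (c : Int) (bg : Int) : Decidable (Pre_extract_val_n4_n8 grid r c bg) := by unfold Pre_extract_val_n4_n8; infer_instance

def pvWitness_extract_val_n4_n8 : List (List Int) × Int × Int × Int := ([[1, 0], [2, 3]], 0, 1, 0)

def Spec_extract_val_n4_n8 (grid : List (List Int)) (r : Int) (c : Int) (bg : Int) (out : Int × Int × Int) : Prop := out = extract_val_n4_n8_alt grid r c bg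
instance (grid : List (List Int)) (r : Int) (c : Int) (bg : Int) (out : Int × Int × Int) : Decidable (Spec_extract_val_n4_n8 grid r c bg out) := by unfold Spec_extract_val_n4_n8; infer_instance

-- ===== CLAIM (what is proved, stated in full; the proofs are below) =====
def Claim_equal_extract_val_n4_n8 : Prop := ∀ (grid : List (List Int)) (r : Int) (c : Int) (bg : Int), Dom_extract_val_n4_n8 grid r c bg → Pre_extract_val_n4_n8 grid r c bg → Spec_extract_val_n4_n8 grid r c bg (extract_val_n4_n8 grid r c bg)

-- ===== LEMMAS AND PROOFS =====
theorem pvCell_eq : pvCellA = pvCellB := rfl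

-- the clamped range [max 0 (x-1), min n (x+2)) is the bounds-filtered list [x-1, x, x+1]
theorem pvRangeClamp (x n : Int) :
    PySem.List.pyRange (max 0 (x - 1)) (min n (x + 2)) 1
      = [x - 1, x, x + 1].filter (fun i => decide (0 ≤ i ∧ i < n)) := by
  have h2 : ([x - 1, x, x + 1].filter (fun i => decide (0 ≤ i ∧ i < n))).Nodup := by
    refine List.Nodup.filter _ ?_
    simp; omega
  have hmem : ∀ i : Int, i ∈ PySem.List.pyRange (max 0 (x - 1)) (min n (x + 2)) 1 ↔
      i ∈ [x - 1, x, x + 1].filter (fun i => decide (0 ≤ i ∧ i < n)) := by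
    intro i
    simp [PySem.List.mem_pyRange_one, List.mem_filter] <;> omega
  have hperm := (List.perm_ext_iff_of_nodup (PySem.List.nodup_pyRange_one _ _) h2).2 hmem
  exact List.Perm.eq_of_pairwise (fun a b _ _ h h' => absurd h (lt_asymm h'))
    (PySem.List.pairwise_lt_pyRange_one _ _)
    (by refine List.Pairwise.filter _ ?_; simp [List.pairwise_cons] <;> omega) hperm

-- fold-counting over the clamped range = three bounds-guarded terms
theorem pvClampSum (g : Int → Int) (x n : Int) :
    ((PySem.List.pyRange (max 0 (x - 1)) (min n (x + 2)) 1).map g).sum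
      = (if 0 ≤ x - 1 ∧ x - 1 < n then g (x - 1) else 0)
        + (if 0 ≤ x ∧ x < n then g x else 0)
        + (if 0 ≤ x + 1 ∧ x + 1 < n then g (x + 1) else 0) := by
  rw [pvRangeClamp]
  simp only [List.filter_cons, List.filter_nil, decide_eq_true_eq]
  split_ifs <;> simp <;> ring

theorem pv_ite_distrib3 (P : Prop) [Decidable P] (a b c : Int) :
    (if P then a + b + c else 0)
      = (if P then a else 0) + (if P then b else 0) + (if P then c else 0) := by
  split_ifs <;> ring

theorem pv_ite_ite (P Q : Prop) [Decidable P] [Decidable Q] (a : Int) :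
    (if P then (if Q then a else 0) else 0) = if P ∧ Q then a else 0 := by
  split_ifs with h1 h2 <;> simp_all

theorem pv_swap4 (P1 P2 Q1 Q2 S : Prop) [Decidable P1] [Decidable P2] [Decidable Q1]
    [Decidable Q2] [Decidable S] (a : Int) :
    (if P1 ∧ P2 ∧ Q1 ∧ Q2 ∧ S then a else 0) = if Q1 ∧ Q2 ∧ P1 ∧ P2 ∧ S then a else 0 :=
  if_congr (by tauto) rfl rfl

-- ===== VERDICT (by name: the statement is the Claim_ definition above) =====
theorem extract_val_n4_n8_spec : Claim_equal_extract_val_n4_n8 := by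
  intro grid r c bg _ _
  unfold Spec_extract_val_n4_n8 extract_val_n4_n8 extract_val_n4_n8_alt
  rw [pvCell_eq]
  simp only [PySem.List.foldl_add, pvClampSum, List.foldl, pv_ite_distrib3, pv_ite_ite]
  norm_num
  simp only [pv_ite_distrib3, pv_ite_ite, apply_ite (f := Prod.fst), apply_ite (f := Prod.snd),
    sub_eq_add_neg, and_assoc]
  rw [pv_swap4 (0 ≤ c) (c < (((PySem.List.pyGet? grid 0).getD []).length : Int))
        (1 ≤ r) (r ≤ (grid.length : Int)) (¬pvCellB grid (r + -1) c = bg) 1,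
      pv_swap4 (0 ≤ c) (c < (((PySem.List.pyGet? grid 0).getD []).length : Int))
        (0 ≤ r) (r < (grid.length : Int)) (¬pvCellB grid r c = bg) 1,
      pv_swap4 (0 ≤ c) (c < (((PySem.List.pyGet? grid 0).getD []).length : Int))
        (0 ≤ r + 1) (r + 1 < (grid.length : Int)) (¬pvCellB grid (r + 1) c = bg) 1]
  by_cases hC : 0 ≤ r ∧ r < (grid.length : Int) ∧ 0 ≤ c ∧
      c < (((PySem.List.pyGet? grid 0).getD []).length : Int) ∧ ¬pvCellB grid r c = bg
  · simp only [if_pos hC]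
    constructor <;> ring
  · simp only [if_neg hC]
    constructor <;> ring
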